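-- pv_equiv track=rewrite | github.com/Infinite-Networker/KursarScript | kursarscript/interpreter.py | _bracket_balance
-- ===== SOURCE A (Python) =====
-- def _bracket_balance(text: str) -> int:
--     """Return net bracket/paren/brace depth for a text (ignoring strings)."""
--     depth = 0
--     in_str = False
--     str_ch = None
--     for ch in text:
--         if in_str:
--             if ch == str_ch:
--                 in_str = False
--         elif ch in ('"', "'"):
--             in_str = True
--             str_ch = ch
--         elif ch in ('(', '['):
--             depth += 1
--         elif ch in (')', ']'):
--             depth -= 1
--         # We intentionally ignore '{' and '}' here because those are
--         # handled by _collect_block; we only care about [] and ()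
--     return depth
-- ===== SOURCE B (Python) =====
-- def _bracket_balance(text: str) -> int:
--     """Strip quoted regions (jump to the matching quote), then count brackets."""
--     kept = []
--     i = 0
--     n = len(text)
--     while i < n:
--         c = text[i]
--         if c == '"' or c == "'":
--             j = text.find(c, i + 1)
--             i = n if j == -1 else j + 1
--         else:
--             kept.append(c)
--             i += 1
--     s = ''.join(kept)
--     return s.count('(') + s.count('[') - s.count(')') - s.count(']')
-- ===== Notes on version B (the rewrite author's own statement) =====
-- stated objective: alternative
-- what changed: Replaces the per-character in_str/str_ch state machine with a normalize-then-count pass: quoted regions are removed by jumping straight to the closing quote with str.find, and the balance is computed arithmetically from four counts on the stripped text.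
import Mathlib
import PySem

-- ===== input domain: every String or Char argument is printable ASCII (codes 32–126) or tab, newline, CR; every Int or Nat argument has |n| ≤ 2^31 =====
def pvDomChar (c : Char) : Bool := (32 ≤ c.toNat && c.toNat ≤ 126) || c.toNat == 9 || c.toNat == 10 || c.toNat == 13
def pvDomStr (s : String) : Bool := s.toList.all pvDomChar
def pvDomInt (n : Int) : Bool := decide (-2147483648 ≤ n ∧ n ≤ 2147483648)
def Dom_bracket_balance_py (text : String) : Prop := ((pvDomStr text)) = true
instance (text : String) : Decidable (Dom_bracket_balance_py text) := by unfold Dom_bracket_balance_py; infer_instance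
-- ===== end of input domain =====

-- B replaces A's in_str state machine with strip-quoted-regions-then-count; alternative structure, same cost.

-- ===== PORT A =====
-- state machine over the characters: depth, in_str, str_ch
def bbLoopA : Int → Bool → Option Char → List Char → Int
  | d, _, _, [] => d
  | d, instr, sc, ch :: rest =>
    if instr then
      if some ch = sc then bbLoopA d false sc rest else bbLoopA d true sc rest
    else if ch = '"' ∨ ch = '\'' then bbLoopA d true (some ch) rest
    else if ch = '(' ∨ ch = '[' then bbLoopA (d + 1) false sc rest
    else if ch = ')' ∨ ch = ']' then bbLoopA (d - 1) false sc rest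
    else bbLoopA d false sc rest

def bracket_balance_py (text : String) : Int :=
  bbLoopA 0 false none text.toList

-- ===== PORT B =====
-- skip to just past the first occurrence of the quote q (text.find + jump in Source B)
def bbSkipStr (q : Char) : List Char → List Char
  | [] => []
  | c :: rest => if c = q then rest else bbSkipStr q rest

theorem bbSkipStr_length_le (q : Char) (l : List Char) : (bbSkipStr q l).length ≤ l.length := by
  induction l with
  | nil => simp [bbSkipStr]
  | cons c rest ih =>
    simp only [bbSkipStr]
    split
    · simp
    · exact Nat.le_succ_of_le ih

-- remove every quoted region (the while loop of Source B)
def bbStrip : List Char → List Char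
  | [] => []
  | c :: rest =>
    if c = '"' ∨ c = '\'' then bbStrip (bbSkipStr c rest)
    else c :: bbStrip rest
termination_by l => l.length
decreasing_by
  · exact Nat.lt_succ_of_le (bbSkipStr_length_le c rest)
  · simp

def bracket_balance_py_alt (text : String) : Int :=
  let s := bbStrip text.toList
  (s.count '(' : Int) + (s.count '[' : Int) - (s.count ')' : Int) - (s.count ']' : Int)

-- ===== PRECONDITION & SPEC =====
def Spec_bracket_balance_py (text : String) (out : Int) : Prop := out = bracket_balance_py_alt text
instance (text : String) (out : Int) : Decidable (Spec_bracket_balance_py text out) := by unfold Spec_bracket_balance_py; infer_instance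

-- ===== CLAIM (what is proved, stated in full; the proofs are below) =====
def Claim_equal_bracket_balance_py : Prop := ∀ (text : String), Dom_bracket_balance_py text → Spec_bracket_balance_py text (bracket_balance_py text)

-- ===== LEMMAS AND PROOFS =====
def bbBal (l : List Char) : Int :=
  (l.count '(' : Int) + (l.count '[' : Int) - (l.count ')' : Int) - (l.count ']' : Int)

theorem bbBal_cons (c : Char) (l : List Char) :
    bbBal (c :: l) =
      (if c = '(' ∨ c = '[' then 1 else if c = ')' ∨ c = ']' then -1 else 0) + bbBal l := by
  simp only [bbBal, List.count_cons]
  by_cases h1 : c = '(' <;> by_cases h2 : c = '[' <;> by_cases h3 : c = ')' <;> by_cases h4 : c = ']' <;>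
    simp_all <;> ring

-- while in a string, A just scans to the closing quote
theorem bbLoopA_instr (q : Char) (l : List Char) (d : Int) :
    bbLoopA d true (some q) l = bbLoopA d false (some q) (bbSkipStr q l) := by
  induction l with
  | nil => simp [bbLoopA, bbSkipStr]
  | cons c rest ih =>
    simp only [bbLoopA, bbSkipStr]
    by_cases h : c = q <;> simp [h, ih]

-- main invariant: out of a string, A's loop adds the balance of the stripped tail
theorem bbLoopA_strip (l : List Char) (d : Int) (sc : Option Char) :
    bbLoopA d false sc l = d + bbBal (bbStrip l) := by
  induction hl : l.length using Nat.strong_induction_on generalizing l d sc with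
  | _ n ih =>
    cases l with
    | nil => simp [bbLoopA, bbStrip, bbBal]
    | cons c rest =>
      subst hl
      by_cases hq : c = '"' ∨ c = '\''
      · have hne1 : ¬ (c = '(' ∨ c = '[') := by rcases hq with h | h <;> subst h <;> decide
        simp only [bbLoopA, bbStrip, if_pos hq]
        rw [if_neg (by rcases hq with h | h <;> subst h <;> decide)]
        rw [bbLoopA_instr]
        exact ih _ (Nat.lt_succ_of_le (bbSkipStr_length_le c rest)) _ d (some c) rfl
      · simp only [bbLoopA, bbStrip, if_neg hq, Bool.false_eq_true, ite_false]
        rw [bbBal_cons]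
        have ihr : ∀ (d' : Int) (sc' : Option Char),
            bbLoopA d' false sc' rest = d' + bbBal (bbStrip rest) :=
          fun d' sc' => ih rest.length (Nat.lt_succ_self _) rest d' sc' rfl
        by_cases h1 : c = '(' ∨ c = '['
        · rw [if_pos h1, if_pos h1, ihr]; ring
        · rw [if_neg h1, if_neg h1]
          by_cases h2 : c = ')' ∨ c = ']'
          · rw [if_pos h2, if_pos h2, ihr]; ring
          · rw [if_neg h2, if_neg h2, ihr]; ring

-- ===== VERDICT (by name: the statement is the Claim_ definition above) =====
theorem bracket_balance_py_spec : Claim_equal_bracket_balance_py := by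
  intro text _
  unfold Spec_bracket_balance_py bracket_balance_py bracket_balance_py_alt
  rw [bbLoopA_strip]
  simp [bbBal]
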